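-- pv_equiv track=rewrite | github.com/corndogit/leetcode-python3 | easy/max_diff_by_remapping_digit.py | minMaxDifference
-- ===== SOURCE A (Python) =====
-- def minMaxDifference(num: int) -> int:
--     s = str(num)
--     uniques = set(s)
--     lowest = int(s.replace(s[0], '0'))
--     highest = 0
--
--     for i in list(uniques):
--         hi_num = s.replace(i, '9')
--         highest = max(highest, int(hi_num))
--
--     return highest - lowest
-- ===== SOURCE B (Python) =====
-- def minMaxDifference(num: int) -> int:
--     s = str(num)
--     hi = s
--     for c in s:
--         if c != '9':
--             hi = s.replace(c, '9')
--             break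
--     return int(hi) - int(s.replace(s[0], '0'))
-- ===== Notes on version B (the rewrite author's own statement) =====
-- stated objective: alternative
-- what changed: B replaces A's exhaustive loop (build the set of distinct digits, try replacing each with '9', keep a running max) by a greedy single scan: the first character of str(num) that is not '9' is the one whose replacement maximises the number, so B replaces just that one and takes no max at all.
import Mathlib
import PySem

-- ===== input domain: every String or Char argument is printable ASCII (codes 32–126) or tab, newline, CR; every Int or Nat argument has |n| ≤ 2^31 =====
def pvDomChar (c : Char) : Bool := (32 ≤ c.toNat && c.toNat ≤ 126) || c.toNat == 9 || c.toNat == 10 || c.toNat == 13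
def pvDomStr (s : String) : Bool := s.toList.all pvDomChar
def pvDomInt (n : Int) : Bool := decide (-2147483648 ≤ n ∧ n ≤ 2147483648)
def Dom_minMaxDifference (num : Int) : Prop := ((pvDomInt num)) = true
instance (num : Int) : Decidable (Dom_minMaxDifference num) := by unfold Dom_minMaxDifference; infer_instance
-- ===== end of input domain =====

-- B replaces A's loop over the set of distinct digits with a running max by a greedy
-- single scan: the first character of str(num) that is not '9' is the one whose
-- replacement by '9' maximises the value, so no max is taken at all (objective: alternative).

-- ===== PORT A =====
-- str(num) is never empty, so reading s[0] with a default character is exact, and every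
-- replaced string parses as an int, so `.getD 0` after ofChars? is exact too (int() never raises here).
def minMaxDifference (num : Int) : Int :=
  let s : List Char := PySem.Int.toChars num
  let uniques : PySem.Set Char := PySem.Set.ofList s
  let lowest : Int := (PySem.Int.ofChars? (PySem.Chars.replace s [s.headD ' '] ['0'])).getD 0
  let highest : Int := uniques.foldl
    (fun highest i => max highest ((PySem.Int.ofChars? (PySem.Chars.replace s [i] ['9'])).getD 0)) 0
  highest - lowest

-- ===== PORT B =====
-- Source B's for-loop with break: scan l, and on the first character ≠ '9' return the
-- replaced string, else (no break) keep s. Same exactness notes as for A.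
def hiLoop (s : List Char) : List Char → List Char
  | [] => s
  | c :: t => if c = '9' then hiLoop s t else PySem.Chars.replace s [c] ['9']

def minMaxDifference_alt (num : Int) : Int :=
  let s : List Char := PySem.Int.toChars num
  let hi : List Char := hiLoop s s
  (PySem.Int.ofChars? hi).getD 0
    - (PySem.Int.ofChars? (PySem.Chars.replace s [s.headD ' '] ['0'])).getD 0

-- ===== PRECONDITION & SPEC =====
def Spec_minMaxDifference (num : Int) (out : Int) : Prop := out = minMaxDifference_alt num
instance (num : Int) (out : Int) : Decidable (Spec_minMaxDifference num out) := by unfold Spec_minMaxDifference; infer_instance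

-- ===== CLAIM (what is proved, stated in full; the proofs are below) =====
def Claim_equal_minMaxDifference : Prop := ∀ (num : Int), Dom_minMaxDifference num → Spec_minMaxDifference num (minMaxDifference num)

-- ===== LEMMAS AND PROOFS =====

-- single-character str.replace is a character map
theorem replace_go_single (o n' : Char) :
    ∀ (fuel : Nat) (l acc : List Char), l.length ≤ fuel →
      PySem.Chars.replace.go [o] [n'] fuel l acc
        = acc.reverse ++ l.map (fun c => if c = o then n' else c) := by
  intro fuel
  induction fuel with
  | zero =>
    intro l acc h
    have : l = [] := List.length_eq_zero_iff.mp (Nat.le_zero.mp h)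
    subst this
    simp [PySem.Chars.replace.go]
  | succ fuel ih =>
    intro l acc h
    cases l with
    | nil => simp [PySem.Chars.replace.go]
    | cons c t =>
      rw [PySem.Chars.replace.go]
      by_cases hc : c = o
      · subst hc
        simp only [List.isPrefixOf, BEq.rfl, Bool.true_and, if_true]
        have e1 : List.drop [c].length (c :: t) = t := rfl
        have e2 : [n'].reverse ++ acc = n' :: acc := rfl
        rw [e1, e2, ih t (n' :: acc) (by simpa using Nat.succ_le_succ_iff.mp h)]
        simp
      · have : [o].isPrefixOf (c :: t) = false := by
          simp [List.isPrefixOf]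
          exact fun e => hc e.symm
        rw [this]
        simp only [Bool.false_eq_true, if_false]
        rw [ih t (c :: acc) (by simpa using Nat.succ_le_succ_iff.mp h)]
        simp [hc]

theorem replace_single (s : List Char) (o n' : Char) :
    PySem.Chars.replace s [o] [n'] = s.map (fun c => if c = o then n' else c) := by
  rw [PySem.Chars.replace]
  simp only [List.isEmpty_cons, Bool.false_eq_true, if_false]
  rw [replace_go_single o n' s.length s [] (le_refl _)]
  simp

-- characters that int() does not strip
theorem digit_not_space {c : Char} (h : c.isDigit = true) : PySem.Int.isIntSpace c = false := by
  simp only [Char.isDigit, decide_eq_true_eq, Bool.and_eq_true] at h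
  simp only [PySem.Int.isIntSpace, Bool.or_eq_false_iff, decide_eq_false_iff_not]
  refine ⟨⟨⟨⟨⟨?_, ?_⟩, ?_⟩, ?_⟩, ?_⟩, ?_⟩ <;>
    (intro e; subst e; revert h; decide)

theorem dropWhile_nospace (l : List Char) (h : ∀ c ∈ l, PySem.Int.isIntSpace c = false) :
    List.dropWhile PySem.Int.isIntSpace l = l := by
  rw [List.dropWhile_eq_self_iff]
  intro hl
  have := h _ (List.getElem_mem hl)
  simp [this]

-- the value of a digit string, accumulated left to right exactly as int() does
def valD (acc : Nat) : List Char → Nat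
  | [] => acc
  | c :: rest => valD (acc * 10 + (c.toNat - '0'.toNat)) rest

theorem valD_append (u : List Char) : ∀ (v : List Char) (acc : Nat),
    valD acc (u ++ v) = valD (valD acc u) v := by
  induction u with
  | nil => intro v acc; rfl
  | cons c t ih => intro v acc; exact ih v (acc * 10 + (c.toNat - '0'.toNat))

theorem digit_toNat {c : Char} (h : c.isDigit = true) : 48 ≤ c.toNat ∧ c.toNat ≤ 57 := by
  simp only [Char.isDigit, decide_eq_true_eq, Bool.and_eq_true] at h
  obtain ⟨h1, h2⟩ := h
  rw [ge_iff_le, UInt32.le_iff_toNat_le] at h1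
  rw [UInt32.le_iff_toNat_le] at h2
  exact ⟨h1, h2⟩

theorem char_eq_iff_toNat (a b : Char) : a = b ↔ a.toNat = b.toNat := by
  constructor
  · intro h; rw [h]
  · intro h; exact Char.ext (UInt32.toNat_inj.mp h)

theorem valD_ge : ∀ (l : List Char) (acc : Nat), acc * 10 ^ l.length ≤ valD acc l := by
  intro l
  induction l with
  | nil =>
    intro acc
    rw [List.length_nil, pow_zero, Nat.mul_one]
    exact Nat.le_of_eq rfl
  | cons c t ih =>
    intro acc
    calc acc * 10 ^ (c :: t).length = (acc * 10) * 10 ^ t.length := by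
          simp [List.length_cons, pow_succ]; ring
      _ ≤ (acc * 10 + (c.toNat - '0'.toNat)) * 10 ^ t.length :=
          Nat.mul_le_mul_right _ (Nat.le_add_right _ _)
      _ ≤ valD (acc * 10 + (c.toNat - '0'.toNat)) t := ih _
      _ = valD acc (c :: t) := rfl

theorem valD_lt : ∀ (l : List Char) (acc : Nat), (∀ c ∈ l, c.isDigit = true) →
    valD acc l < (acc + 1) * 10 ^ l.length := by
  intro l
  induction l with
  | nil =>
    intro acc _
    rw [List.length_nil, pow_zero, Nat.mul_one]
    exact Nat.lt_succ_of_le (Nat.le_of_eq rfl)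
  | cons c t ih =>
    intro acc h
    have hd : c.toNat - '0'.toNat ≤ 9 := by
      have h48 : ('0' : Char).toNat = 48 := rfl
      have := digit_toNat (h c List.mem_cons_self); omega
    calc valD acc (c :: t) = valD (acc * 10 + (c.toNat - '0'.toNat)) t := rfl
      _ < (acc * 10 + (c.toNat - '0'.toNat) + 1) * 10 ^ t.length :=
          ih _ (fun x hx => h x (List.mem_cons_of_mem _ hx))
      _ ≤ ((acc + 1) * 10) * 10 ^ t.length := Nat.mul_le_mul_right _ (by omega)
      _ = (acc + 1) * 10 ^ (c :: t).length := by simp [List.length_cons, pow_succ]; ring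

-- go-loop characterization, parameterized over the loop function so that `apply`
-- can instantiate it with int()'s internal digit loop by unification
theorem key_go (g : List Char → Bool → Nat → Option Nat)
    (hnil : ∀ b acc, g [] b acc = if b = true then some acc else none)
    (hcons : ∀ c rest b acc, g (c :: rest) b acc =
      if c.isDigit = true then g rest true (acc * 10 + (c.toNat - '0'.toNat))
      else
        if c = '_' ∧ b = true then
          match rest with
          | d :: _ => if d.isDigit = true then g rest false acc else none
          | [] => none
        else none) :
    ∀ ds b acc, ds ≠ [] → (∀ c ∈ ds, c.isDigit = true) → g ds b acc = some (valD acc ds) := by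
  intro ds
  induction ds with
  | nil => intro b acc h; exact absurd rfl h
  | cons c rest ih =>
    intro b acc _ hdig
    rw [hcons, if_pos (hdig c List.mem_cons_self)]
    cases rest with
    | nil => rw [hnil]; rfl
    | cons d tail =>
      rw [ih true _ (by simp) (fun x hx => hdig x (List.mem_cons_of_mem _ hx))]
      rfl

theorem key_dv (dv : List Char → Option Nat) (g : List Char → Bool → Nat → Option Nat)
    (hdv : ∀ d tail, dv (d :: tail) =
      if d.isDigit = true then g tail true (0 * 10 + (d.toNat - '0'.toNat))
      else
        if d = '_' ∧ false = true then
          match tail with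
          | e :: _ => if e.isDigit = true then g tail false 0 else none
          | [] => none
        else none)
    (hnil : ∀ b acc, g [] b acc = if b = true then some acc else none)
    (hcons : ∀ c rest b acc, g (c :: rest) b acc =
      if c.isDigit = true then g rest true (acc * 10 + (c.toNat - '0'.toNat))
      else
        if c = '_' ∧ b = true then
          match rest with
          | d :: _ => if d.isDigit = true then g rest false acc else none
          | [] => none
        else none)
    (c : Char) (rest : List Char) (hdig : ∀ x ∈ c :: rest, x.isDigit = true) :
    (Option.map (fun n : Int => n) do
      let a ← dv (c :: rest)
      pure (↑a : Int)) = some (↑(valD 0 (c :: rest)) : Int) := by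
  rw [hdv, if_pos (hdig c List.mem_cons_self)]
  cases rest with
  | nil => rw [hnil]; rfl
  | cons d tl =>
    rw [key_go g hnil hcons _ true _ (by simp) (fun x hx => hdig x (List.mem_cons_of_mem _ hx))]
    rfl

theorem key_dv_neg (dv : List Char → Option Nat) (g : List Char → Bool → Nat → Option Nat)
    (hdv : ∀ d tail, dv (d :: tail) =
      if d.isDigit = true then g tail true (0 * 10 + (d.toNat - '0'.toNat))
      else
        if d = '_' ∧ false = true then
          match tail with
          | e :: _ => if e.isDigit = true then g tail false 0 else none
          | [] => none
        else none)
    (hnil : ∀ b acc, g [] b acc = if b = true then some acc else none)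
    (hcons : ∀ c rest b acc, g (c :: rest) b acc =
      if c.isDigit = true then g rest true (acc * 10 + (c.toNat - '0'.toNat))
      else
        if c = '_' ∧ b = true then
          match rest with
          | d :: _ => if d.isDigit = true then g rest false acc else none
          | [] => none
        else none)
    (c : Char) (rest : List Char) (hdig : ∀ x ∈ c :: rest, x.isDigit = true) :
    (Option.map (fun n : Int => -n) do
      let a ← dv (c :: rest)
      pure (↑a : Int)) = some (-(↑(valD 0 (c :: rest)) : Int)) := by
  rw [hdv, if_pos (hdig c List.mem_cons_self)]
  cases rest with
  | nil => rw [hnil]; rfl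
  | cons d tl =>
    rw [key_go g hnil hcons _ true _ (by simp) (fun x hx => hdig x (List.mem_cons_of_mem _ hx))]
    rfl

-- int() on a pure digit string
theorem parse_digits (c : Char) (rest : List Char) (h : ∀ x ∈ c :: rest, x.isDigit = true) :
    PySem.Int.ofChars? (c :: rest) = some ((valD 0 (c :: rest) : Nat) : Int) := by
  have hns : ∀ x ∈ c :: rest, PySem.Int.isIntSpace x = false :=
    fun x hx => digit_not_space (h x hx)
  simp only [PySem.Int.ofChars?]
  rw [dropWhile_nospace _ hns,
      dropWhile_nospace _ (by intro x hx; exact hns x (List.mem_reverse.mp hx)),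
      List.reverse_reverse]
  split
  · rename_i cs ds heq
    have hc : c = '-' := (List.cons.injEq .. ▸ heq).1
    have hd := h c List.mem_cons_self
    rw [hc] at hd; exact absurd hd (by decide)
  · rename_i cs ds heq
    have hc : c = '+' := (List.cons.injEq .. ▸ heq).1
    have hd := h c List.mem_cons_self
    rw [hc] at hd; exact absurd hd (by decide)
  · apply key_dv
    · intro d tail; rfl
    · intro b acc; rfl
    · intro c' r' b acc; rfl
    · exact h

-- int() on '-' followed by a pure digit string
theorem parse_neg_digits (c : Char) (rest : List Char) (h : ∀ x ∈ c :: rest, x.isDigit = true) :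
    PySem.Int.ofChars? ('-' :: c :: rest) = some (-((valD 0 (c :: rest) : Nat) : Int)) := by
  have hns : ∀ x ∈ '-' :: c :: rest, PySem.Int.isIntSpace x = false := by
    intro x hx
    rcases List.mem_cons.mp hx with rfl | hx
    · decide
    · exact digit_not_space (h x hx)
  simp only [PySem.Int.ofChars?]
  rw [dropWhile_nospace _ hns,
      dropWhile_nospace _ (by intro x hx; exact hns x (List.mem_reverse.mp hx)),
      List.reverse_reverse]
  split
  · rename_i cs ds heq
    have hds : c :: rest = ds := (List.cons.injEq .. ▸ heq).2
    subst hds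
    apply key_dv_neg
    · intro d tail; rfl
    · intro b acc; rfl
    · intro c' r' b acc; rfl
    · exact h
  · rename_i cs ds heq
    exact absurd (List.cons.injEq .. ▸ heq).1 (by decide)
  · rename_i cs hne _
    exact absurd rfl (hne (c :: rest))

-- str(n)'s digits
theorem digitChar_isDigit {n : Nat} (h : n < 10) : (Nat.digitChar n).isDigit = true := by
  interval_cases n <;> decide

theorem toDigitsCore_digits :
    ∀ (fuel n : Nat) (acc : List Char), (∀ c ∈ acc, c.isDigit = true) →
      ∀ c ∈ Nat.toDigitsCore 10 fuel n acc, c.isDigit = true := by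
  intro fuel
  induction fuel with
  | zero => intro n acc hacc; simpa [Nat.toDigitsCore] using hacc
  | succ fuel ih =>
    intro n acc hacc
    rw [Nat.toDigitsCore]
    have hd : ∀ c ∈ (n % 10).digitChar :: acc, c.isDigit = true := by
      intro c hc
      rcases List.mem_cons.mp hc with h1 | h1
      · subst h1; exact digitChar_isDigit (Nat.mod_lt _ (by norm_num))
      · exact hacc _ h1
    split
    · exact hd
    · exact ih _ _ hd

theorem toDigitsCore_len :
    ∀ (fuel n : Nat) (acc : List Char), acc.length ≤ (Nat.toDigitsCore 10 fuel n acc).length := by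
  intro fuel
  induction fuel with
  | zero => intro n acc; simp [Nat.toDigitsCore]
  | succ fuel ih =>
    intro n acc
    rw [Nat.toDigitsCore]
    split
    · simp
    · exact le_trans (by simp) (ih (n / 10) ((n % 10).digitChar :: acc))

theorem toDigits_ne_nil (n : Nat) : Nat.toDigits 10 n ≠ [] := by
  rw [Nat.toDigits, Nat.toDigitsCore]
  split
  · simp
  · intro e
    have := toDigitsCore_len n (n / 10) ((n % 10).digitChar :: [])
    rw [e] at this
    simp at this

theorem toDigits_digits (n : Nat) : ∀ c ∈ Nat.toDigits 10 n, c.isDigit = true :=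
  toDigitsCore_digits _ _ _ (by simp)

-- max folds
theorem foldl_max_le_iff :
    ∀ (xs : List Int) (a c : Int), xs.foldl max a ≤ c ↔ (a ≤ c ∧ ∀ x ∈ xs, x ≤ c) := by
  intro xs
  induction xs with
  | nil => simp
  | cons x t ih =>
    intro a c
    simp only [List.foldl_cons, ih, max_le_iff, List.mem_cons]
    constructor
    · rintro ⟨⟨h1, h2⟩, h3⟩
      exact ⟨h1, by rintro y (rfl | hy); exact h2; exact h3 y hy⟩
    · rintro ⟨h1, h2⟩
      exact ⟨⟨h1, h2 x (Or.inl rfl)⟩, fun y hy => h2 y (Or.inr hy)⟩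

theorem foldl_fmax_eq (l : List Char) (f : Char → Int) (H : Int)
    (h0 : 0 ≤ H) (hub : ∀ c ∈ l, f c ≤ H) (hmem : ∃ c ∈ l, f c = H) :
    l.foldl (fun a c => max a (f c)) 0 = H := by
  rw [← List.foldl_map]
  apply le_antisymm
  · rw [foldl_max_le_iff]
    exact ⟨h0, by intro x hx; rcases List.mem_map.mp hx with ⟨y, hy, rfl⟩; exact hub y hy⟩
  · obtain ⟨c, hc, hfc⟩ := hmem
    have h := (foldl_max_le_iff (l.map f) 0 ((l.map f).foldl max 0)).mp (le_refl _)
    exact hfc ▸ h.2 _ (List.mem_map_of_mem hc)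

-- hiLoop characterization
theorem hiLoop_all9 (s : List Char) : ∀ l, (∀ c ∈ l, c = '9') → hiLoop s l = s := by
  intro l
  induction l with
  | nil => intro _; rfl
  | cons c t ih =>
    intro h
    rw [hiLoop, if_pos (h c List.mem_cons_self)]
    exact ih (fun x hx => h x (List.mem_cons_of_mem _ hx))

theorem hiLoop_split (s : List Char) :
    ∀ (P : List Char) (c0 : Char) (R : List Char), (∀ c ∈ P, c = '9') → c0 ≠ '9' →
      hiLoop s (P ++ c0 :: R) = PySem.Chars.replace s [c0] ['9'] := by
  intro P
  induction P with
  | nil => intro c0 R _ h9; rw [List.nil_append, hiLoop, if_neg h9]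
  | cons p t ih =>
    intro c0 R hP h9
    rw [List.cons_append, hiLoop, if_pos (hP p List.mem_cons_self)]
    exact ih c0 R (fun x hx => hP x (List.mem_cons_of_mem _ hx)) h9

theorem parse_digits' (ds : List Char) (hne : ds ≠ []) (h : ∀ x ∈ ds, x.isDigit = true) :
    PySem.Int.ofChars? ds = some ((valD 0 ds : Nat) : Int) := by
  obtain ⟨c, rest, rfl⟩ := List.exists_cons_of_ne_nil hne
  exact parse_digits c rest h

theorem parse_neg' (ds : List Char) (hne : ds ≠ []) (h : ∀ x ∈ ds, x.isDigit = true) :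
    PySem.Int.ofChars? ('-' :: ds) = some (-((valD 0 ds : Nat) : Int)) := by
  obtain ⟨c, rest, rfl⟩ := List.exists_cons_of_ne_nil hne
  exact parse_neg_digits c rest h

theorem set_fold_eq (l : List Char) (f : Char → Int) (H : Int)
    (h0 : 0 ≤ H) (hub : ∀ c ∈ l, f c ≤ H) (hmem : ∃ c ∈ l, f c = H) :
    (PySem.Set.ofList l).foldl (fun a c => max a (f c)) 0 = H := by
  apply foldl_fmax_eq _ f H h0
  · intro c hc; exact hub c ((PySem.Set.mem_ofList l c).mp hc)
  · obtain ⟨c, hc, he⟩ := hmem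
    exact ⟨c, (PySem.Set.mem_ofList l c).mpr hc, he⟩

theorem digit_ne_dash {c : Char} (h : c.isDigit = true) : c ≠ '-' := by
  intro e
  have := digit_toNat h
  rw [e] at this
  revert this; decide

theorem nine_is_digit : ('9' : Char).isDigit = true := by decide

-- replacing a character inside an all-digit list keeps it all-digit
theorem map_repl_digits {c : Char} (l : List Char) (h : ∀ x ∈ l, x.isDigit = true) :
    ∀ x ∈ l.map (fun y => if y = c then '9' else y), x.isDigit = true := by
  intro x hx
  rcases List.mem_map.mp hx with ⟨y, hy, rfl⟩
  by_cases hyc : y = c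
  · rw [if_pos hyc]; exact nine_is_digit
  · rw [if_neg hyc]; exact h y hy

-- replacing a character that never occurs contained in an all-'9' list is the identity
theorem map_repl_all9 {c : Char} (l : List Char) (h : ∀ x ∈ l, x = '9') :
    l.map (fun y => if y = c then '9' else y) = l := by
  rw [show l = l.map id by simp]
  rw [List.map_map]
  apply List.map_congr_left
  intro x hx
  simp only [Function.comp, id]
  by_cases hxc : x = c
  · rw [if_pos hxc, h x hx]
  · rw [if_neg hxc]

theorem map_repl_nomatch {c : Char} (l : List Char) (h : ∀ x ∈ l, x ≠ c) :
    l.map (fun y => if y = c then '9' else y) = l := by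
  rw [show l = l.map id by simp]
  rw [List.map_map]
  apply List.map_congr_left
  intro x hx
  simp only [Function.comp, id]
  rw [if_neg (h x (by simpa using hx))]

-- negative numbers: replacing the leading '-' by '9' wins
theorem case_neg (D : List Char) (hDne : D ≠ []) (hDd : ∀ c ∈ D, c.isDigit = true) :
    (PySem.Set.ofList ('-' :: D)).foldl
      (fun h i => max h ((PySem.Int.ofChars?
        (PySem.Chars.replace ('-' :: D) [i] ['9'])).getD 0)) 0
      = (PySem.Int.ofChars? (hiLoop ('-' :: D) ('-' :: D))).getD 0 := by
  have hrepl : PySem.Chars.replace ('-' :: D) ['-'] ['9'] = '9' :: D := by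
    rw [replace_single, List.map_cons, if_pos rfl]
    congr 1
    exact map_repl_nomatch D (fun x hx => digit_ne_dash (hDd x hx))
  have h9D : ∀ x ∈ '9' :: D, x.isDigit = true := by
    intro x hx
    rcases List.mem_cons.mp hx with rfl | hx
    · exact nine_is_digit
    · exact hDd x hx
  have hhi : hiLoop ('-' :: D) ('-' :: D) = '9' :: D := by
    rw [hiLoop, if_neg (by decide : ¬('-' : Char) = '9')]
    exact hrepl
  rw [hhi, parse_digits' ('9' :: D) (by simp) h9D, Option.getD_some]
  apply set_fold_eq
  · exact Int.natCast_nonneg _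
  · intro c hc
    rcases List.mem_cons.mp hc with rfl | hcD
    · rw [hrepl, parse_digits' ('9' :: D) (by simp) h9D, Option.getD_some]
    · have hcd := hDd c hcD
      have hrc : PySem.Chars.replace ('-' :: D) [c] ['9']
          = '-' :: D.map (fun y => if y = c then '9' else y) := by
        rw [replace_single, List.map_cons, if_neg (Ne.symm (digit_ne_dash hcd))]
      rw [hrc, parse_neg' _ (by simpa using hDne) (map_repl_digits D hDd), Option.getD_some]
      exact le_trans (neg_nonpos.mpr (Int.natCast_nonneg _)) (Int.natCast_nonneg _)
  · refine ⟨'-', List.mem_cons_self, ?_⟩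
    rw [hrepl, parse_digits' ('9' :: D) (by simp) h9D, Option.getD_some]

-- nonnegative, all digits '9': every replacement is the identity
theorem case_all9 (D : List Char) (hDne : D ≠ []) (hDd : ∀ c ∈ D, c.isDigit = true)
    (hall : ∀ c ∈ D, c = '9') :
    (PySem.Set.ofList D).foldl
      (fun h i => max h ((PySem.Int.ofChars?
        (PySem.Chars.replace D [i] ['9'])).getD 0)) 0
      = (PySem.Int.ofChars? (hiLoop D D)).getD 0 := by
  have hfc : ∀ c ∈ D, (PySem.Int.ofChars? (PySem.Chars.replace D [c] ['9'])).getD 0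
      = ((valD 0 D : Nat) : Int) := by
    intro c hc
    have : PySem.Chars.replace D [c] ['9'] = D := by
      rw [replace_single]
      rw [(hall c hc : c = '9')]
      exact map_repl_all9 D hall
    rw [this, parse_digits' D hDne hDd, Option.getD_some]
  rw [hiLoop_all9 D D hall, parse_digits' D hDne hDd, Option.getD_some]
  apply set_fold_eq
  · exact Int.natCast_nonneg _
  · intro c hc; exact le_of_eq (hfc c hc)
  · obtain ⟨d, t, rfl⟩ := List.exists_cons_of_ne_nil hDne
    exact ⟨d, List.mem_cons_self, hfc d List.mem_cons_self⟩

-- nonnegative with some digit ≠ '9': replacing the first such digit wins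
theorem case_pos (D : List Char) (hDne : D ≠ []) (hDd : ∀ c ∈ D, c.isDigit = true)
    (hall : ¬ ∀ c ∈ D, c = '9') :
    (PySem.Set.ofList D).foldl
      (fun h i => max h ((PySem.Int.ofChars?
        (PySem.Chars.replace D [i] ['9'])).getD 0)) 0
      = (PySem.Int.ofChars? (hiLoop D D)).getD 0 := by
  obtain ⟨P, c0, R, hP9, hc09, hsplit⟩ :
      ∃ P c0 R, (∀ x ∈ P, x = '9') ∧ c0 ≠ '9' ∧ D = P ++ c0 :: R := by
    have hQne : D.dropWhile (fun c => c == '9') ≠ [] := by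
      intro e
      rw [List.dropWhile_eq_nil_iff] at e
      exact hall (fun c hc => by simpa using e c hc)
    obtain ⟨c0, R, hQ⟩ := List.exists_cons_of_ne_nil hQne
    refine ⟨D.takeWhile (fun c => c == '9'), c0, R, ?_, ?_, ?_⟩
    · intro x hx; simpa using List.mem_takeWhile_imp hx
    · have := List.head_dropWhile_not (fun c => c == '9') hQne
      simpa [hQ] using this
    · rw [← hQ]
      exact (List.takeWhile_append_dropWhile).symm
  subst hsplit
  have hc0d : c0.isDigit = true := hDd c0 (by simp)
  have hRd : ∀ x ∈ R, x.isDigit = true := fun x hx => hDd x (by simp [hx])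
  have hrepl : ∀ c : Char, PySem.Chars.replace (P ++ c0 :: R) [c] ['9']
      = P ++ (if c0 = c then '9' else c0) :: R.map (fun y => if y = c then '9' else y) := by
    intro c
    rw [replace_single, List.map_append, List.map_cons, map_repl_all9 P hP9]
  have hdigAll : ∀ c : Char,
      ∀ x ∈ P ++ (if c0 = c then '9' else c0) :: R.map (fun y => if y = c then '9' else y),
        x.isDigit = true := by
    intro c x hx
    rcases List.mem_append.mp hx with hx | hx
    · rw [hP9 x hx]; exact nine_is_digit
    · rcases List.mem_cons.mp hx with rfl | hx
      · by_cases h : c0 = c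
        · rw [if_pos h]; exact nine_is_digit
        · rw [if_neg h]; exact hc0d
      · exact map_repl_digits R hRd x hx
  rw [hiLoop_split _ P c0 R hP9 hc09, hrepl c0,
      parse_digits' _ (by simp) (hdigAll c0), Option.getD_some]
  apply set_fold_eq
  · exact Int.natCast_nonneg _
  · intro c hc
    rw [hrepl c, parse_digits' _ (by simp) (hdigAll c), Option.getD_some]
    apply Nat.cast_le.mpr
    by_cases hcc : c0 = c
    · subst hcc
      exact Nat.le_refl _
    · rw [if_neg hcc, if_pos rfl]
      rw [valD_append, valD_append]
      have hkey : valD (valD 0 P) (c0 :: R.map (fun y => if y = c then '9' else y))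
          < valD (valD 0 P) ('9' :: R.map (fun y => if y = c0 then '9' else y)) := by
        have hlen : (R.map (fun y => if y = c then '9' else y)).length
            = (R.map (fun y => if y = c0 then '9' else y)).length := by simp
        have hc56 : c0.toNat ≤ 56 := by
          have h57 := (digit_toNat hc0d).2
          have hne57 : c0.toNat ≠ 57 := by
            intro e
            exact hc09 ((char_eq_iff_toNat c0 '9').mpr (by rw [e]; rfl))
          omega
        have h48 : 48 ≤ c0.toNat := (digit_toNat hc0d).1
        have h0n : ('0' : Char).toNat = 48 := rfl
        calc valD (valD 0 P) (c0 :: R.map (fun y => if y = c then '9' else y))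
            = valD (valD 0 P * 10 + (c0.toNat - '0'.toNat))
                (R.map (fun y => if y = c then '9' else y)) := rfl
          _ < (valD 0 P * 10 + (c0.toNat - '0'.toNat) + 1)
                * 10 ^ (R.map (fun y => if y = c then '9' else y)).length :=
              valD_lt _ _ (map_repl_digits R hRd)
          _ ≤ (valD 0 P * 10 + 9) * 10 ^ (R.map (fun y => if y = c0 then '9' else y)).length := by
              rw [← hlen]
              exact Nat.mul_le_mul_right _ (by omega)
          _ ≤ valD (valD 0 P * 10 + 9) (R.map (fun y => if y = c0 then '9' else y)) := valD_ge _ _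
          _ = valD (valD 0 P * 10 + (('9' : Char).toNat - ('0' : Char).toNat))
                (R.map (fun y => if y = c0 then '9' else y)) := rfl
          _ = valD (valD 0 P) ('9' :: R.map (fun y => if y = c0 then '9' else y)) := rfl
      exact Nat.le_of_lt hkey
  · refine ⟨c0, by simp, ?_⟩
    rw [hrepl c0, parse_digits' _ (by simp) (hdigAll c0), Option.getD_some]

-- the main equality of the two "highest" computations
theorem highest_eq (num : Int) :
    (PySem.Set.ofList (PySem.Int.toChars num)).foldl
      (fun h i => max h ((PySem.Int.ofChars?
        (PySem.Chars.replace (PySem.Int.toChars num) [i] ['9'])).getD 0)) 0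
      = (PySem.Int.ofChars? (hiLoop (PySem.Int.toChars num) (PySem.Int.toChars num))).getD 0 := by
  rw [PySem.Int.toChars]
  by_cases hneg : num < 0
  · rw [if_pos hneg]
    exact case_neg _ (toDigits_ne_nil _) (toDigits_digits _)
  · rw [if_neg hneg]
    by_cases hall : ∀ c ∈ Nat.toDigits 10 num.toNat, c = '9'
    · exact case_all9 _ (toDigits_ne_nil _) (toDigits_digits _) hall
    · exact case_pos _ (toDigits_ne_nil _) (toDigits_digits _) hall

-- ===== VERDICT (by name: the statement is the Claim_ definition above) =====
theorem minMaxDifference_spec : Claim_equal_minMaxDifference := by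
  intro num _
  unfold Spec_minMaxDifference minMaxDifference minMaxDifference_alt
  dsimp only
  rw [highest_eq num]
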